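-- pv_equiv track=rewrite | github.com/n22dccn196/signbridge | models/option3_stgcn.py | _hand_edges
-- ===== SOURCE A (Python) =====
-- def _hand_edges(offset: int):
--     """Generate hand connectivity for 21 keypoints starting at offset."""
--     raw = [
--         (0, 1), (1, 2), (2, 3), (3, 4),        # thumb
--         (0, 5), (5, 6), (6, 7), (7, 8),        # index
--         (0, 9), (9, 10), (10, 11), (11, 12),   # middle
--         (0, 13),(13, 14),(14, 15),(15, 16),     # ring
--         (0, 17),(17, 18),(18, 19),(19, 20),     # pinky
--         (5, 9), (9, 13), (13, 17),              # palm
--     ]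
--     return [(a + offset, b + offset) for a, b in raw]
-- ===== SOURCE B (Python) =====
-- def _hand_edges(offset: int):
--     """Generate hand connectivity for 21 keypoints starting at offset."""
--     fingers = [[0, 1, 2, 3, 4],
--                [0, 5, 6, 7, 8],
--                [0, 9, 10, 11, 12],
--                [0, 13, 14, 15, 16],
--                [0, 17, 18, 19, 20]]
--     edges = []
--     for chain in fingers:
--         for a, b in zip(chain, chain[1:]):
--             edges.append((a + offset, b + offset))
--     for a, b in [(5, 9), (9, 13), (13, 17)]:
--         edges.append((a + offset, b + offset))
--     return edges
-- ===== Notes on version B (the rewrite author's own statement) =====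
-- stated objective: alternative
-- what changed: B derives the edges from five finger joint chains by zipping consecutive joints (plus the three palm edges), instead of listing every raw edge pair explicitly.
import Mathlib
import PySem

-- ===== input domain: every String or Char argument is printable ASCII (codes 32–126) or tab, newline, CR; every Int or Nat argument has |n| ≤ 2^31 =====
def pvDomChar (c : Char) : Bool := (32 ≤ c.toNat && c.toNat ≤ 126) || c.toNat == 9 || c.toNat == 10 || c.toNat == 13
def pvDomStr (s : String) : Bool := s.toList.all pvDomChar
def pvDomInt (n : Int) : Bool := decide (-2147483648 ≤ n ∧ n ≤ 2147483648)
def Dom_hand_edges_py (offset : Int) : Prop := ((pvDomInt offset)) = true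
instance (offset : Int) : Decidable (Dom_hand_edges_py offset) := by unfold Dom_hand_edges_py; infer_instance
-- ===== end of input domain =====

-- B builds the edge list from finger joint chains (zip consecutive) plus palm edges; alternative decomposition, same output.
-- ===== PORT A =====
def hand_edges_py (offset : Int) : List (Int × Int) :=
  let raw : List (Int × Int) :=
    [(0, 1), (1, 2), (2, 3), (3, 4),
     (0, 5), (5, 6), (6, 7), (7, 8),
     (0, 9), (9, 10), (10, 11), (11, 12),
     (0, 13), (13, 14), (14, 15), (15, 16),
     (0, 17), (17, 18), (18, 19), (19, 20),
     (5, 9), (9, 13), (13, 17)]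
  raw.map (fun p => (p.1 + offset, p.2 + offset))

-- ===== PORT B =====
def hand_edges_py_alt (offset : Int) : List (Int × Int) :=
  let fingers : List (List Int) :=
    [[0, 1, 2, 3, 4], [0, 5, 6, 7, 8], [0, 9, 10, 11, 12],
     [0, 13, 14, 15, 16], [0, 17, 18, 19, 20]]
  let edges :=
    fingers.foldl (fun edges chain =>
      (chain.zip (chain.drop 1)).foldl
        (fun edges p => edges ++ [(p.1 + offset, p.2 + offset)]) edges) []
  ([((5:Int), (9:Int)), (9, 13), (13, 17)]).foldl
    (fun edges p => edges ++ [(p.1 + offset, p.2 + offset)]) edges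

-- ===== PRECONDITION & SPEC =====
def Spec_hand_edges_py (offset : Int) (out : List (Int × Int)) : Prop := out = hand_edges_py_alt offset
instance (offset : Int) (out : List (Int × Int)) : Decidable (Spec_hand_edges_py offset out) := by unfold Spec_hand_edges_py; infer_instance

-- ===== CLAIM (what is proved, stated in full; the proofs are below) =====
def Claim_equal_hand_edges_py : Prop := ∀ (offset : Int), Dom_hand_edges_py offset → Spec_hand_edges_py offset (hand_edges_py offset)

-- ===== LEMMAS AND PROOFS =====

-- ===== VERDICT (by name: the statement is the Claim_ definition above) =====
theorem hand_edges_py_spec : Claim_equal_hand_edges_py := by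
  intro offset _
  unfold Spec_hand_edges_py hand_edges_py hand_edges_py_alt
  simp [List.foldl, List.zip, List.zipWith, List.map]
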